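-- pv_equiv track=rewrite | github.com/Laswer5/Skrubbify | Skrubbify.py | isolateItems
-- ===== SOURCE A (Python) =====
-- currentItemDelimiterStart = "Artikelnummer"
--
-- currentItemDelimiterStop = "-"
--
-- def isolateItems(itemList):
--     newList = []
--     delimCount = 0
--
--     for x in itemList:
--         if x.startswith(currentItemDelimiterStart) == False and delimCount == 0:
--             continue
--         elif x.startswith(currentItemDelimiterStart) == True:
--             delimCount = 1
--         elif delimCount == 1 and x.startswith(currentItemDelimiterStop) == False:
--             newList.append(x)
--         elif x.startswith(currentItemDelimiterStop) == True:
--             break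
--
--     return newList
-- ===== SOURCE B (Python) =====
-- currentItemDelimiterStart = "Artikelnummer"
--
-- currentItemDelimiterStop = "-"
--
-- def isolateItems(itemList):
--     i = next((k for k, x in enumerate(itemList)
--               if x.startswith(currentItemDelimiterStart)), None)
--     if i is None:
--         return []
--     rest = itemList[i + 1:]
--     j = next((k for k, x in enumerate(rest)
--               if x.startswith(currentItemDelimiterStop)), len(rest))
--     return [x for x in rest[:j]
--             if not x.startswith(currentItemDelimiterStart)]
-- ===== Notes on version B (the rewrite author's own statement) =====
-- stated objective: idiomatic
-- what changed: Replaced the single stateful loop with a delimCount flag and break by three declarative phases: locate the first start-marker index, slice up to the first stop-marker after it, and filter out further start-markers with a comprehension.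
import Mathlib
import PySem

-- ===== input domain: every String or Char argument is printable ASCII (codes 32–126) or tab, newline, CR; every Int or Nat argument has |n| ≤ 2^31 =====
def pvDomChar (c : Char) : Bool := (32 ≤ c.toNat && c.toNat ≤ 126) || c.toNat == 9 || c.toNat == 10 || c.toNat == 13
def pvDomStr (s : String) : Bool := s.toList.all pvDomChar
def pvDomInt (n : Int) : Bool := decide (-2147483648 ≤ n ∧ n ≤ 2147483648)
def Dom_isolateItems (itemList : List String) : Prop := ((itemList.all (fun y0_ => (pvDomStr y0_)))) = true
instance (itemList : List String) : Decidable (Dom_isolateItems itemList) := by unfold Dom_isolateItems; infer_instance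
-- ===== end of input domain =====

-- B re-implements the same extraction declaratively (find start index, slice to stop, filter); same O(n) cost, no speed claim.

-- ===== PORT A =====
-- the loop of A: state = (accumulated newList, delimCount); `break` returns the accumulator
def isolateItemsGo : List String → List String → Int → List String
  | [], acc, _ => acc
  | x :: xs, acc, d =>
    if !(PySem.Str.startswith x "Artikelnummer") && (d == 0) then
      isolateItemsGo xs acc d
    else if PySem.Str.startswith x "Artikelnummer" then
      isolateItemsGo xs acc 1
    else if (d == 1) && !(PySem.Str.startswith x "-") then
      isolateItemsGo xs (acc ++ [x]) d
    else if PySem.Str.startswith x "-" then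
      acc
    else
      isolateItemsGo xs acc d

def isolateItems (itemList : List String) : List String :=
  isolateItemsGo itemList [] 0

-- ===== PORT B =====
-- first index whose element starts with prefix p (the `next(enumerate…)` generator)
def findPrefIdx (p : String) : List String → Option Nat
  | [] => none
  | x :: xs => if PySem.Str.startswith x p then some 0 else (findPrefIdx p xs).map (· + 1)

def isolateItems_alt (itemList : List String) : List String :=
  match findPrefIdx "Artikelnummer" itemList with
  | none => []
  | some i =>
    let rest := itemList.drop (i + 1)
    let j := (findPrefIdx "-" rest).getD rest.length
    (rest.take j).filter (fun x => !(PySem.Str.startswith x "Artikelnummer"))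

-- ===== PRECONDITION & SPEC =====
def Spec_isolateItems (itemList : List String) (out : List String) : Prop := out = isolateItems_alt itemList
instance (itemList : List String) (out : List String) : Decidable (Spec_isolateItems itemList out) := by unfold Spec_isolateItems; infer_instance

-- ===== CLAIM (what is proved, stated in full; the proofs are below) =====
def Claim_equal_isolateItems : Prop := ∀ (itemList : List String), Dom_isolateItems itemList → Spec_isolateItems itemList (isolateItems itemList)

-- ===== LEMMAS AND PROOFS =====

theorem tl_start : "Artikelnummer".toList = ['A','r','t','i','k','e','l','n','u','m','m','e','r'] := by decide
theorem tl_stop : "-".toList = ['-'] := by decide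

-- no string starts with both "Artikelnummer" and "-" (first characters differ)
theorem not_both_pref (x : String) :
    PySem.Str.startswith x "Artikelnummer" = true → PySem.Str.startswith x "-" = false := by
  simp only [PySem.Str.startswith_eq, PySem.Chars.startswith_iff]
  intro h
  rw [← Bool.not_eq_true, PySem.Chars.startswith_iff]
  intro hb
  obtain ⟨t, ht⟩ := h
  obtain ⟨t', ht'⟩ := hb
  have hA : "Artikelnummer".toList = 'A' :: "rtikelnummer".toList := by decide
  have hD : "-".toList = ['-'] := by decide
  rw [← ht, hA, hD] at ht'
  simp at ht'

-- the accumulator of A's phase-1 loop is only appended to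
theorem go_acc (xs : List String) : ∀ acc,
    isolateItemsGo xs acc 1 = acc ++ isolateItemsGo xs [] 1 := by
  induction xs with
  | nil => intro acc; simp [isolateItemsGo]
  | cons x xs ih =>
    intro acc
    simp only [isolateItemsGo]
    split_ifs with h1 h2 h3 h4
    · simp at h1
    · exact ih acc
    · rw [ih (acc ++ [x]), ih ([] ++ [x])]; simp
    · simp
    · exact ih acc

-- A's phase-1 loop equals B's take-to-stop-then-filter
theorem go_phase1 (xs : List String) :
    isolateItemsGo xs [] 1 =
      (xs.take ((findPrefIdx "-" xs).getD xs.length)).filter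
        (fun x => !(PySem.Str.startswith x "Artikelnummer")) := by
  induction xs with
  | nil => simp [isolateItemsGo]
  | cons x xs ih =>
    simp only [isolateItemsGo, findPrefIdx]
    by_cases hstop : PySem.Str.startswith x "-" = true
    · have hstart : PySem.Str.startswith x "Artikelnummer" = false := by
        by_contra h
        rw [Bool.not_eq_false] at h
        rw [not_both_pref x h] at hstop
        exact Bool.false_ne_true hstop
      simp only [PySem.Str.startswith_eq, tl_start, tl_stop] at hstop hstart
      simp [hstop, hstart]
    · rw [Bool.not_eq_true] at hstop
      have hj : ((findPrefIdx "-" xs).map (· + 1)).getD (xs.length + 1)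
          = ((findPrefIdx "-" xs).getD xs.length) + 1 := by
        cases findPrefIdx "-" xs <;> simp
      by_cases hstart : PySem.Str.startswith x "Artikelnummer" = true
      · have hstop' := hstop; have hstart' := hstart
        simp only [PySem.Str.startswith_eq, tl_start, tl_stop] at hstop' hstart'
        simp [hstop', hstart', hj, List.take_succ_cons, ih]
      · rw [Bool.not_eq_true] at hstart
        have hstop' := hstop; have hstart' := hstart
        simp only [PySem.Str.startswith_eq, tl_start, tl_stop] at hstop' hstart'
        simp [hstop', hstart', hj, List.take_succ_cons]
        rw [go_acc xs [x], ih]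
        simp

-- A's phase-0 loop (scanning for the first start marker) equals B
theorem go_phase0 (xs : List String) :
    isolateItemsGo xs [] 0 = isolateItems_alt xs := by
  induction xs with
  | nil => simp [isolateItemsGo, isolateItems_alt, findPrefIdx]
  | cons x xs ih =>
    simp only [isolateItemsGo, isolateItems_alt, findPrefIdx]
    by_cases hstart : PySem.Str.startswith x "Artikelnummer" = true
    · have hstart' := hstart
      simp only [PySem.Str.startswith_eq, tl_start] at hstart'
      rw [go_phase1 xs]
      simp [hstart']
    · rw [Bool.not_eq_true] at hstart
      have hstart' := hstart
      simp only [PySem.Str.startswith_eq, tl_start] at hstart'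
      rw [ih]
      simp only [isolateItems_alt]
      cases h : findPrefIdx "Artikelnummer" xs with
      | none => simp [hstart']
      | some i => simp [hstart']

-- ===== VERDICT (by name: the statement is the Claim_ definition above) =====
theorem isolateItems_spec : Claim_equal_isolateItems := by
  intro itemList _
  unfold Spec_isolateItems isolateItems
  exact go_phase0 itemList
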